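-- pv_equiv track=rewrite | github.com/beyourself0623/DES-RSA | DES/des.py | keyToBinary
-- ===== SOURCE A (Python) =====
-- def keyToBinary(key):
--     key_bytes = key.encode('utf_8')
--
--     if(len(key_bytes) < 8):
--         key_bytes = key_bytes.ljust(8, b'\0') # pad with 0 in bytes
--
--     elif (len(key_bytes) > 8): #minus the extra bytes part
--         key_bytes = key_bytes[:8]
--
--     #convert to binary
--
--     key_binary = ""
--     for byte in key_bytes:
--         binary = format(byte,'08b')
--         key_binary += binary
--
--     return key_binary
-- ===== SOURCE B (Python) =====
-- def keyToBinary(key):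
--     key_bytes = key.encode('utf_8')
--     # truncation via slice, right-padding with NUL bytes via a left bit-shift:
--     # no length-guard branches and no per-byte loop at all
--     n = int.from_bytes(key_bytes[:8], 'big') << 8 * max(0, 8 - len(key_bytes))
--     return format(n, '064b')
-- ===== Notes on version B (the rewrite author's own statement) =====
-- stated objective: idiomatic
-- what changed: The pad/truncate branch plus the per-byte format-and-concatenate loop is replaced branch-free by slicing to at most 8 bytes, one big-endian int.from_bytes conversion, a left shift that accounts for missing bytes, and a single 64-digit zero-padded binary format.
import Mathlib
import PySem

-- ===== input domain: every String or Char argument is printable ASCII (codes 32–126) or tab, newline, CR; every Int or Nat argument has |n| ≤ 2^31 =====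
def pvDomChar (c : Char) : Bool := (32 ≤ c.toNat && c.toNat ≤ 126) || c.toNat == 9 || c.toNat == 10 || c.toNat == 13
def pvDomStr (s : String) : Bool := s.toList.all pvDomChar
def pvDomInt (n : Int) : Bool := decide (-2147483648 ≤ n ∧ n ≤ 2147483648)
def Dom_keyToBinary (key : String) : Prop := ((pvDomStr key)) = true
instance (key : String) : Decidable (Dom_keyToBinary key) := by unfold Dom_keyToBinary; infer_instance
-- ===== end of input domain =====

-- B drops A's pad/truncate branch and per-byte format loop: slice to 8 bytes,
-- one big-endian int conversion, a compensating left shift, one 064b format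
-- (same value; objective: idiomatic).
-- key.encode('utf_8') is ported as the list of character codes — exact on the ASCII domain Dom.

-- ===== PORT A =====
def keyToBinary (key : String) : String :=
  let kb0 : List Int := key.toList.map (fun c => (c.toNat : Int))
  let kb : List Int :=
    if kb0.length < 8 then kb0 ++ List.replicate (8 - kb0.length) (0 : Int)
    else if kb0.length > 8 then kb0.take 8
    else kb0
  -- for byte in key_bytes: key_binary += format(byte, '08b')
  String.ofList (kb.foldl (fun acc b => acc ++ PySem.Chars.zfill (PySem.Int.toBinChars b) 8) [])

-- ===== PORT B =====
def keyToBinary_alt (key : String) : String :=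
  let kb : List Int := key.toList.map (fun c => (c.toNat : Int))
  -- n = int.from_bytes(key_bytes[:8], 'big') << 8 * max(0, 8 - len(key_bytes))
  -- Nat subtraction 8 - len is exactly max(0, 8 - len); << k is * 2 ^ k
  let n : Int := (kb.take 8).foldl (fun a b => a * 256 + b) 0 * 2 ^ (8 * (8 - kb.length))
  -- format(n, '064b')
  String.ofList (PySem.Chars.zfill (PySem.Int.toBinChars n) 64)

-- ===== PRECONDITION & SPEC =====
def Spec_keyToBinary (key : String) (out : String) : Prop := out = keyToBinary_alt key
instance (key : String) (out : String) : Decidable (Spec_keyToBinary key out) := by unfold Spec_keyToBinary; infer_instance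

-- ===== CLAIM (what is proved, stated in full; the proofs are below) =====
def Claim_equal_keyToBinary : Prop := ∀ (key : String), Dom_keyToBinary key → Spec_keyToBinary key (keyToBinary key)

-- ===== LEMMAS AND PROOFS =====

/-- Minimal binary representation (msb first), the content of `Nat.toDigits 2`. -/
def natBin (n : Nat) : List Char :=
  if _h : n < 2 then [Nat.digitChar n]
  else natBin (n / 2) ++ [Nat.digitChar (n % 2)]
decreasing_by exact Nat.div_lt_self (by omega) (by omega)

/-- `natBin` left-padded with '0' to width `w` (no truncation; if the number is wider, it wins). -/
def padBin (w n : Nat) : List Char :=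
  List.replicate (w - (natBin n).length) '0' ++ natBin n

theorem toDigitsCore_eq_natBin (f : Nat) : ∀ (n : Nat) (acc : List Char), n < 2 ^ f →
    Nat.toDigitsCore 2 (f + 1) n acc = natBin n ++ acc := by
  induction f with
  | zero =>
    intro n acc hn
    interval_cases n
    rw [Nat.toDigitsCore, natBin, dif_pos (by omega : (0:Nat) < 2)]
    simp
  | succ f ih =>
    intro n acc hn
    by_cases h2 : n < 2
    · have hz : n / 2 = 0 := by omega
      have hm : n % 2 = n := by omega
      rw [Nat.toDigitsCore, natBin, dif_pos h2]
      simp [hz, hm]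
    · have hne : ¬ n / 2 = 0 := by omega
      have hdiv : n / 2 < 2 ^ f := by
        have hp : (2:Nat) ^ (f + 1) = 2 ^ f * 2 := by ring
        omega
      rw [Nat.toDigitsCore]
      simp only [hne, if_false]
      rw [ih (n / 2) _ hdiv]
      conv_rhs => rw [natBin, dif_neg h2]
      simp

theorem toDigits_eq_natBin (n : Nat) : Nat.toDigits 2 n = natBin n := by
  have := toDigitsCore_eq_natBin n n [] (Nat.lt_two_pow_self)
  simpa [Nat.toDigits] using this

theorem natBin_head (n : Nat) : ∃ c rest, natBin n = c :: rest ∧ (c = '0' ∨ c = '1') := by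
  induction n using Nat.strong_induction_on with
  | _ n ih =>
    by_cases h : n < 2
    · rw [natBin, dif_pos h]
      interval_cases n
      · exact ⟨'0', [], rfl, Or.inl rfl⟩
      · exact ⟨'1', [], rfl, Or.inr rfl⟩
    · rw [natBin, dif_neg h]
      obtain ⟨c, rest, heq, hc⟩ := ih (n / 2) (Nat.div_lt_self (by omega) (by omega))
      exact ⟨c, rest ++ [Nat.digitChar (n % 2)], by rw [heq]; simp, hc⟩

/-- `zfill` of a binary string over a natural width is exactly `padBin`. -/
theorem zfill_natBin (n w : Nat) : PySem.Chars.zfill (natBin n) (w : Int) = padBin w n := by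
  obtain ⟨c, rest, heq, hc⟩ := natBin_head n
  rw [padBin, PySem.Chars.zfill.eq_def]
  by_cases hle : (w : Int) ≤ ((natBin n).length : Int)
  · have h0 : w - (natBin n).length = 0 := by
      have : w ≤ (natBin n).length := by exact_mod_cast hle
      omega
    simp [hle, h0]
  · rw [if_neg hle, heq]
    rcases hc with rfl | rfl <;>
      simp [Int.toNat_natCast, ← heq]

/-- Length of `natBin n` is at most `w` when `n < 2 ^ w`, `1 ≤ w`. -/
theorem natBin_length_le (w : Nat) : ∀ n, 1 ≤ w → n < 2 ^ w → (natBin n).length ≤ w := by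
  induction w with
  | zero => intro n h; omega
  | succ w ih =>
    intro n _ hn
    by_cases h : n < 2
    · rw [natBin, dif_pos h]; simp
    · rw [natBin, dif_neg h]
      simp only [List.length_append, List.length_singleton]
      have hw : 1 ≤ w := by
        by_contra hw
        have hw0 : w = 0 := by omega
        rw [hw0] at hn
        norm_num at hn
        omega
      have hdiv : n / 2 < 2 ^ w := by
        have hp : (2:Nat) ^ (w + 1) = 2 ^ w * 2 := by ring
        omega
      have := ih (n / 2) hw hdiv
      omega

theorem padBin_zero (v : Nat) (hv : 1 ≤ v) : padBin v 0 = List.replicate v '0' := by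
  have h0 : natBin 0 = ['0'] := by rw [natBin, dif_pos (by omega : (0:Nat) < 2)]; norm_num [Nat.digitChar]
  rw [padBin, h0]
  have : List.replicate (v - 1) '0' ++ ['0'] = List.replicate (v - 1 + 1) '0' := by
    rw [← List.replicate_succ' (n := v - 1)]
  simp only [List.length_singleton, this]
  congr 1
  omega

/-- Peeling the least-significant bit off a padded binary representation. -/
theorem padBin_succ (w r : Nat) (hw : 1 ≤ w) :
    padBin (w + 1) r = padBin w (r / 2) ++ [Nat.digitChar (r % 2)] := by
  by_cases h : r < 2
  · have h2 : r / 2 = 0 := by omega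
    have hm : r % 2 = r := by omega
    rw [padBin, h2, padBin_zero w hw, hm]
    rw [show natBin r = [Nat.digitChar r] by rw [natBin, dif_pos h]]
    simp only [List.length_singleton]
    have : List.replicate (w + 1 - 1) '0' = List.replicate w '0' := by congr 1
    rw [this]
  · rw [padBin, padBin]
    conv_lhs => rw [natBin, dif_neg h]
    simp only [List.length_append, List.length_singleton]
    have : w + 1 - ((natBin (r / 2)).length + 1) = w - (natBin (r / 2)).length := by omega
    rw [this, List.append_assoc]

/-- Prepending high bits: `natBin (a * 2^w + r)` splits for positive `a`. -/
theorem natBin_split (w : Nat) : ∀ a r, 1 ≤ w → 0 < a → r < 2 ^ w →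
    natBin (a * 2 ^ w + r) = natBin a ++ padBin w r := by
  induction w with
  | zero => intro a r h; omega
  | succ w ih =>
    intro a r _ ha hr
    have hbig : ¬ (a * 2 ^ (w + 1) + r < 2) := by
      have h2 : 2 ≤ 2 ^ (w + 1) := by
        calc (2:Nat) = 2 ^ 1 := by norm_num
        _ ≤ 2 ^ (w + 1) := Nat.pow_le_pow_right (by omega) (by omega)
      nlinarith
    have hp : (2:Nat) ^ (w + 1) = 2 ^ w * 2 := by ring
    have hdiv : (a * 2 ^ (w + 1) + r) / 2 = a * 2 ^ w + r / 2 := by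
      rw [hp, show a * (2 ^ w * 2) = a * 2 ^ w * 2 from by ring]
      omega
    have hmod : (a * 2 ^ (w + 1) + r) % 2 = r % 2 := by
      rw [hp, show a * (2 ^ w * 2) = a * 2 ^ w * 2 from by ring]
      omega
    by_cases hw : 1 ≤ w
    · rw [natBin, dif_neg hbig, hdiv, hmod]
      have hr2 : r / 2 < 2 ^ w := by omega
      rw [ih a (r / 2) hw ha hr2, List.append_assoc, ← padBin_succ w r hw]
    · have hw0 : w = 0 := by omega
      subst hw0
      rw [natBin, dif_neg hbig, hdiv, hmod]
      norm_num at hr ⊢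
      have hz : r / 2 = 0 := by omega
      have hm : r % 2 = r := by omega
      rw [hz, hm]
      congr 1
      rw [padBin]
      rw [show natBin r = [Nat.digitChar r] by rw [natBin, dif_pos (by omega : r < 2)]]
      simp

/-- Splitting a padded binary representation at a byte (bit-block) boundary. -/
theorem padBin_split (v w a r : Nat) (hv : 1 ≤ v) (hw : 1 ≤ w)
    (ha : a < 2 ^ v) (hr : r < 2 ^ w) :
    padBin (v + w) (a * 2 ^ w + r) = padBin v a ++ padBin w r := by
  by_cases ha0 : a = 0
  · subst ha0
    simp only [Nat.zero_mul, Nat.zero_add]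
    rw [padBin_zero v hv, padBin, padBin]
    have hlen : (natBin r).length ≤ w := natBin_length_le w r hw hr
    have harith : v + w - (natBin r).length = v + (w - (natBin r).length) := by omega
    rw [harith, List.replicate_add, List.append_assoc]
  · have ha' : 0 < a := by omega
    have hlena : (natBin a).length ≤ v := natBin_length_le v a hv ha
    have hpw : (padBin w r).length = w := by
      rw [padBin]
      have := natBin_length_le w r hw hr
      simp only [List.length_append, List.length_replicate]
      omega
    conv_lhs => rw [padBin, natBin_split w a r hw ha' hr]
    have hL : (natBin a ++ padBin w r).length = (natBin a).length + w := by
      rw [List.length_append, hpw]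
    rw [hL, show v + w - ((natBin a).length + w) = v - (natBin a).length from by omega]
    conv_rhs => rw [padBin]
    rw [List.append_assoc]

/-- foldl shift-out of the initial accumulator. -/
theorem foldl_byte_shift (bs : List Nat) : ∀ a : Nat,
    bs.foldl (fun x b => x * 256 + b) a = a * 256 ^ bs.length + bs.foldl (fun x b => x * 256 + b) 0 := by
  induction bs with
  | nil => intro a; simp
  | cons b bs ih =>
    intro a
    simp only [List.foldl_cons, List.length_cons, Nat.zero_mul, Nat.zero_add]
    rw [ih (a * 256 + b), ih b]
    ring

theorem foldl_byte_lt (bs : List Nat) (hb : ∀ b ∈ bs, b < 256) :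
    bs.foldl (fun x b => x * 256 + b) 0 < 256 ^ bs.length := by
  induction bs with
  | nil => simp
  | cons b bs ih =>
    simp only [List.foldl_cons, List.length_cons, Nat.zero_mul, Nat.zero_add]
    rw [foldl_byte_shift bs b]
    have h1 : b < 256 := hb b (List.mem_cons_self ..)
    have h2 := ih (fun x hx => hb x (List.mem_cons_of_mem _ hx))
    have : (b + 1) * 256 ^ bs.length ≤ 256 ^ (bs.length + 1) := by
      have : b + 1 ≤ 256 := by omega
      calc (b + 1) * 256 ^ bs.length ≤ 256 * 256 ^ bs.length := Nat.mul_le_mul_right _ this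
      _ = 256 ^ (bs.length + 1) := by ring
    nlinarith

theorem foldl_zeros (k : Nat) :
    (List.replicate k (0:Nat)).foldl (fun x b => x * 256 + b) 0 = 0 := by
  induction k with
  | zero => simp
  | succ k ihk => rw [List.replicate_succ, List.foldl_cons]; simpa using ihk

/-- Appending zero bytes multiplies the big-endian value by 256 per byte. -/
theorem foldl_append_zeros (xs : List Nat) (k : Nat) :
    (xs ++ List.replicate k 0).foldl (fun x b => x * 256 + b) 0 =
    xs.foldl (fun x b => x * 256 + b) 0 * 256 ^ k := by
  rw [List.foldl_append]
  induction k generalizing xs with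
  | zero => simp
  | succ k ih =>
    rw [List.replicate_succ, List.foldl_cons, foldl_byte_shift, List.length_replicate,
        foldl_byte_shift (List.replicate k 0) 0, foldl_zeros]
    ring

/-- The main content lemma: the 64-bit padded binary of the big-endian byte value
equals the concatenation of the 8-bit padded binaries of the bytes. -/
theorem padBin_flatMap (bs : List Nat) (hne : bs ≠ []) (hb : ∀ b ∈ bs, b < 256) :
    padBin (8 * bs.length) (bs.foldl (fun x b => x * 256 + b) 0) =
    bs.flatMap (fun b => padBin 8 b) := by
  induction bs with
  | nil => exact absurd rfl hne
  | cons b bs ih =>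
    by_cases hbs : bs = []
    · subst hbs; simp
    · have hb' : ∀ x ∈ bs, x < 256 := fun x hx => hb x (List.mem_cons_of_mem _ hx)
      have hbl : b < 256 := hb b (List.mem_cons_self ..)
      have hlen : 1 ≤ bs.length := by
        have := List.length_pos_iff.mpr hbs
        omega
      simp only [List.foldl_cons, List.length_cons, Nat.zero_mul, Nat.zero_add,
        List.flatMap_cons]
      rw [foldl_byte_shift bs b]
      have h256 : (256 : Nat) ^ bs.length = 2 ^ (8 * bs.length) := by
        rw [show (256 : Nat) = 2 ^ 8 by norm_num, ← pow_mul]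
      have hfold := foldl_byte_lt bs hb'
      rw [h256] at hfold ⊢
      have h8 : 8 * (bs.length + 1) = 8 + 8 * bs.length := by ring
      rw [h8, padBin_split 8 (8 * bs.length) b _ (by omega) (by omega) (by omega) hfold]
      rw [ih hbs hb']

/-- `PySem.Int.toBinChars` on a natural number is `natBin`. -/
theorem toBinChars_natCast (n : Nat) : PySem.Int.toBinChars (Int.ofNat n) = natBin n := by
  rw [PySem.Int.toBinChars]
  simp [toDigits_eq_natBin]

/-- Int fold equals the cast of the Nat fold on casted byte lists. -/
theorem foldl_int_eq_nat (ns : List Nat) : ∀ a : Nat,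
    (List.map Int.ofNat ns).foldl (fun x b => x * 256 + b) (Int.ofNat a) =
    Int.ofNat (ns.foldl (fun x b => x * 256 + b) a) := by
  induction ns with
  | nil => intro a; simp
  | cons b ns ih =>
    intro a
    simp only [List.map_cons, List.foldl_cons]
    have hcast : Int.ofNat a * 256 + Int.ofNat b = Int.ofNat (a * 256 + b) := by
      simp [Int.ofNat_eq_natCast]
    rw [hcast, ih]

-- ===== VERDICT (by name: the statement is the Claim_ definition above) =====
theorem keyToBinary_spec : Claim_equal_keyToBinary := by
  intro key hdom
  unfold Spec_keyToBinary keyToBinary keyToBinary_alt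
  -- the character codes as naturals
  set ns0 : List Nat := key.toList.map Char.toNat with hns0
  have hmap : key.toList.map (fun c => (c.toNat : Int)) = List.map Int.ofNat ns0 := by
    rw [hns0, List.map_map]; rfl
  have hb0 : ∀ b ∈ ns0, b < 256 := by
    intro b hbmem
    rw [hns0] at hbmem
    obtain ⟨c, hc, rfl⟩ := List.mem_map.mp hbmem
    have := (List.all_eq_true.mp hdom) c hc
    simp only [pvDomChar, Bool.or_eq_true, Bool.and_eq_true, decide_eq_true_eq, beq_iff_eq] at this
    omega
  -- A's guarded byte list, on the Nat side, and its closed form: take 8 then zero-pad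
  set ns : List Nat :=
    if ns0.length < 8 then ns0 ++ List.replicate (8 - ns0.length) 0
    else if ns0.length > 8 then ns0.take 8
    else ns0 with hns
  have hns_eq : ns = ns0.take 8 ++ List.replicate (8 - ns0.length) 0 := by
    rw [hns]
    split_ifs with h1 h2
    · rw [List.take_of_length_le (by omega)]
    · rw [show 8 - ns0.length = 0 from by omega, List.replicate_zero, List.append_nil]
    · rw [show 8 - ns0.length = 0 from by omega, List.replicate_zero, List.append_nil,
          List.take_of_length_le (by omega)]
  have hguard :
      (if (List.map Int.ofNat ns0).length < 8 then
        List.map Int.ofNat ns0 ++ List.replicate (8 - (List.map Int.ofNat ns0).length) (0 : Int)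
      else if (List.map Int.ofNat ns0).length > 8 then (List.map Int.ofNat ns0).take 8
      else List.map Int.ofNat ns0) = List.map Int.ofNat ns := by
    rw [hns]
    simp only [List.length_map]
    split_ifs with h1 h2
    · rw [List.map_append, List.map_replicate]; rfl
    · rw [List.map_take]
    · rfl
  have hb : ∀ b ∈ ns, b < 256 := by
    intro b hbmem
    rw [hns_eq] at hbmem
    rcases List.mem_append.mp hbmem with h | h
    · exact hb0 b (List.mem_of_mem_take h)
    · have := List.eq_of_mem_replicate h; omega
  have hlen : ns.length = 8 := by
    rw [hns_eq]
    simp [List.length_take]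
    omega
  have hne : ns ≠ [] := by intro h; rw [h] at hlen; simp at hlen
  simp only [hmap, hguard]
  -- A side: the accumulation loop is the flatMap of per-byte padded binaries
  rw [PySem.List.foldl_append_eq_flatMap]
  rw [List.nil_append, List.flatMap_map]
  have hA : (fun b : Nat => PySem.Chars.zfill (PySem.Int.toBinChars (Int.ofNat b)) 8) =
      fun b : Nat => padBin 8 b := by
    funext b
    rw [toBinChars_natCast, show (8 : Int) = ((8 : Nat) : Int) from rfl, zfill_natBin]
  rw [hA]
  -- B side: the sliced fold times the shift is the fold over A's padded list
  rw [← List.map_take, show (0 : Int) = Int.ofNat 0 from rfl, foldl_int_eq_nat,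
      List.length_map]
  have hshift : Int.ofNat ((ns0.take 8).foldl (fun x b => x * 256 + b) 0) *
      2 ^ (8 * (8 - ns0.length)) =
      Int.ofNat (ns.foldl (fun x b => x * 256 + b) 0) := by
    rw [hns_eq, foldl_append_zeros]
    push_cast [Int.ofNat_eq_natCast]
    rw [show (256 : Int) = 2 ^ 8 from by norm_num, ← pow_mul]
  rw [hshift, toBinChars_natCast, show (64 : Int) = ((64 : Nat) : Int) from rfl, zfill_natBin]
  have h64 : (64 : Nat) = 8 * ns.length := by omega
  rw [h64, padBin_flatMap ns hne hb]
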